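-- pv_equiv track=rewrite | github.com/jansona/ybg_toys | ShamirSSP/ShamirSSP.py | InputShadow
-- ===== SOURCE A (Python) =====
-- def InputShadow(aline):
--     id = ""
--     shadow = []
--     i = 0
--     while(i < len(aline)):
--         if aline[i].isdigit():
--             id += str(aline[i])
--             i += 1
--         else:
--             break
--     i += 1
--     noDigit = True
--     temp = ""
--     while(i < len(aline)):
--         if aline[i].isdigit():
--             temp += aline[i]
--             noDigit = False
--         elif noDigit:
--             pass
--         else:
--             shadow.append(int(temp))
--             temp = ""
--             noDigit = True
--         i += 1
--     if len(temp) != 0: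
--         shadow.append(int(temp))
--     return (int(id), shadow)
-- ===== SOURCE B (Python) =====
-- def InputShadow(aline):
--     # Mask every non-digit character to a space, then let str.split() deliver the
--     # maximal digit runs in one go: the first run is the id, the rest are shadows.
--     runs = ''.join(c if c.isdigit() else ' ' for c in aline).split()
--     return (int(runs[0]), [int(r) for r in runs[1:]])
-- ===== Notes on version B (the rewrite author's own statement) =====
-- stated objective: idiomatic
-- what changed: Replaces A's two index-driven while loops and the noDigit/temp state machine by masking every non-digit character to a space and taking the digit runs from a single str.split() call (first run = id, rest = shadow).
import Mathlib
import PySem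

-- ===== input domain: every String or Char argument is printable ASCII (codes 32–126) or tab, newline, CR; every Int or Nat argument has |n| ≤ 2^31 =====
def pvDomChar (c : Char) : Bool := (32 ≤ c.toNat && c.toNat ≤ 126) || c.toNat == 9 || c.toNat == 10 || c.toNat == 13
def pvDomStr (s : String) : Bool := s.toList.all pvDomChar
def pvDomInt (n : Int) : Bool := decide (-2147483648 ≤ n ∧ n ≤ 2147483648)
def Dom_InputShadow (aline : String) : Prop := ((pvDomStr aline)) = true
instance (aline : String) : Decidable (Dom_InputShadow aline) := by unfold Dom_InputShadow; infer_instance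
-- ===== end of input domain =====

-- B masks non-digit characters to spaces and reads the digit runs off one split() call
-- instead of A's two index-driven while loops with a noDigit/temp state machine (objective: idiomatic).

-- ===== PORT A =====
-- int(s) of a digit string; under Pre_ every int() call of A gets a nonempty digit string, so getD 0 is never used
def pvAInt (cs : List Char) : Int := (PySem.Int.ofChars? cs).getD 0

-- first while loop: consume leading digits into id, stop at the first non-digit
def pvALoop1 : List Char → List Char × List Char
  | [] => ([], [])
  | c :: rest =>
      if PySem.Chars.isdigit c then
        let p := pvALoop1 rest
        (c :: p.1, p.2)
      else ([], c :: rest)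

-- second while loop over the remaining characters with state (noDigit, temp, shadow);
-- the trailing 'if len(temp) != 0' flush is the [] case
def pvALoop2 : List Char → Bool → List Char → List Int → List Int
  | [], _, temp, shadow => if temp.length ≠ 0 then shadow ++ [pvAInt temp] else shadow
  | c :: rest, noDigit, temp, shadow =>
      if PySem.Chars.isdigit c then pvALoop2 rest false (temp ++ [c]) shadow
      else if noDigit then pvALoop2 rest noDigit temp shadow
      else pvALoop2 rest true [] (shadow ++ [pvAInt temp])

def InputShadow (aline : String) : Int × List Int :=
  -- 'i += 1' after the first loop skips the character the first loop stopped on: drop 1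
  (pvAInt (pvALoop1 aline.toList).1,
   pvALoop2 ((pvALoop1 aline.toList).2.drop 1) true [] [])

-- ===== PORT B =====
def pvBInt (cs : List Char) : Int := (PySem.Int.ofChars? cs).getD 0

def InputShadow_alt (aline : String) : Int × List Int :=
  match PySem.Chars.split₀ (aline.toList.map (fun c => if PySem.Chars.isdigit c then c else ' ')) with
  | [] => (0, [])   -- runs[0] raises IndexError in Python here; outside Pre_
  | r :: rs => (pvBInt r, rs.map pvBInt)

-- ===== PRECONDITION & SPEC =====
-- Pre_ excludes exactly the inputs on which A raises: when aline does not start with a digit,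
-- the id stays empty and int() of the empty id string raises ValueError, so A returns no value there.
def Pre_InputShadow (aline : String) : Prop :=
  aline.toList ≠ [] ∧ PySem.Chars.isdigit (aline.toList.headD ' ') = true
instance (aline : String) : Decidable (Pre_InputShadow aline) := by unfold Pre_InputShadow; infer_instance

def pvWitness_InputShadow : String := "12-34 56"

def Spec_InputShadow (aline : String) (out : Int × List Int) : Prop := out = InputShadow_alt aline
instance (aline : String) (out : Int × List Int) : Decidable (Spec_InputShadow aline out) := by unfold Spec_InputShadow; infer_instance

-- ===== CLAIM (what is proved, stated in full; the proofs are below) =====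
def Claim_equal_InputShadow : Prop := ∀ (aline : String), Dom_InputShadow aline → Pre_InputShadow aline → Spec_InputShadow aline (InputShadow aline)

-- ===== LEMMAS AND PROOFS =====

-- the character mask used by B
def pvMask (c : Char) : Char := if PySem.Chars.isdigit c then c else ' '

theorem pv_digit_not_space (c : Char) (h : PySem.Chars.isdigit c = true) :
    PySem.Chars.isspace c = false := by
  simp [PySem.Chars.isdigit] at h
  have h1 : 48 ≤ c.toNat := by exact_mod_cast h.1
  have h2 : c.toNat ≤ 57 := by exact_mod_cast h.2
  simp only [PySem.Chars.isspace, Bool.or_eq_false_iff, Bool.and_eq_false_iff,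
    decide_eq_false_iff_not]
  omega

theorem pvALoop1_span (cs : List Char) :
    pvALoop1 cs = (cs.takeWhile PySem.Chars.isdigit, cs.dropWhile PySem.Chars.isdigit) := by
  induction cs with
  | nil => rfl
  | cons c rest ih =>
      by_cases h : PySem.Chars.isdigit c = true
      · simp [pvALoop1, h, ih]
      · simp [pvALoop1, h]

-- split₀.go's accumulator holds the finished words, reversed
theorem pv_go_acc (cs : List Char) :
    ∀ cur acc, PySem.Chars.split₀.go cs cur acc =
      acc.reverse ++ PySem.Chars.split₀.go cs cur [] := by
  induction cs with
  | nil =>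
      intro cur acc
      by_cases h : cur.isEmpty = true <;> simp [PySem.Chars.split₀.go, h]
  | cons c rest ih =>
      intro cur acc
      by_cases hs : PySem.Chars.isspace c = true
      · by_cases hc : cur.isEmpty = true
        · simp only [PySem.Chars.split₀.go, hs, hc, if_true]
          exact ih [] acc
        · simp only [PySem.Chars.split₀.go, hs, hc, if_true]
          rw [if_neg (by simp), if_neg (by simp)]
          rw [ih [] (cur.reverse :: acc), ih [] [cur.reverse]]
          simp
      · simp only [PySem.Chars.split₀.go, hs]
        rw [if_neg (by simp), if_neg (by simp)]
        exact ih (c :: cur) acc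

-- A's second loop computes exactly the ints of the digit runs split₀ finds in the masked tail
theorem pvALoop2_go (cs : List Char) :
    ∀ temp shadow, pvALoop2 cs temp.isEmpty temp shadow =
      shadow ++ (PySem.Chars.split₀.go (cs.map pvMask) temp.reverse []).map pvAInt := by
  induction cs with
  | nil =>
      intro temp shadow
      cases temp with
      | nil => simp [pvALoop2, PySem.Chars.split₀.go]
      | cons t ts => simp [pvALoop2, PySem.Chars.split₀.go]
  | cons c rest ih =>
      intro temp shadow
      by_cases h : PySem.Chars.isdigit c = true
      · have hm : pvMask c = c := by unfold pvMask; simp [h]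
        have hspc : PySem.Chars.isspace c = false := pv_digit_not_space c h
        have hgo : PySem.Chars.split₀.go ((c :: rest).map pvMask) temp.reverse [] =
            PySem.Chars.split₀.go (rest.map pvMask) (c :: temp.reverse) [] := by
          simp only [List.map_cons, hm, PySem.Chars.split₀.go]
          rw [if_neg (by simp [hspc])]
        have h1 : pvALoop2 (c :: rest) temp.isEmpty temp shadow =
            pvALoop2 rest false (temp ++ [c]) shadow := by
          simp only [pvALoop2, h, if_true]
        rw [h1, hgo]
        have hthis := ih (temp ++ [c]) shadow
        rw [show (temp ++ [c]).isEmpty = false by simp] at hthis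
        simpa [List.reverse_append] using hthis
      · have hm : pvMask c = ' ' := by unfold pvMask; simp [h]
        have hsp : PySem.Chars.isspace ' ' = true := by decide
        cases temp with
        | nil =>
            have h1 : pvALoop2 (c :: rest) true [] shadow = pvALoop2 rest true [] shadow := by
              simp [pvALoop2, h]
            have hgo : PySem.Chars.split₀.go ((c :: rest).map pvMask) [] [] =
                PySem.Chars.split₀.go (rest.map pvMask) [] [] := by
              simp only [List.map_cons, hm, PySem.Chars.split₀.go, hsp, if_true, List.isEmpty_nil]
            simp only [List.isEmpty_nil, List.reverse_nil] at *
            rw [h1, hgo]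
            have hthis := ih [] shadow
            simpa using hthis
        | cons t ts =>
            have h1 : pvALoop2 (c :: rest) (t :: ts).isEmpty (t :: ts) shadow =
                pvALoop2 rest true [] (shadow ++ [pvAInt (t :: ts)]) := by
              simp only [pvALoop2, h, List.isEmpty_cons]
              rw [if_neg (by simp), if_neg (by simp)]
            have hgo : PySem.Chars.split₀.go ((c :: rest).map pvMask) (t :: ts).reverse [] =
                (t :: ts) :: PySem.Chars.split₀.go (rest.map pvMask) [] [] := by
              simp only [List.map_cons, hm, PySem.Chars.split₀.go, hsp, if_true]
              rw [if_neg (by simp)]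
              rw [pv_go_acc (rest.map pvMask) [] [(t :: ts).reverse.reverse]]
              simp
            rw [h1, hgo]
            have hthis := ih [] (shadow ++ [pvAInt (t :: ts)])
            simp only [List.isEmpty_nil, List.reverse_nil] at hthis
            rw [hthis]
            simp
 
-- the first loop's digit prefix becomes split₀.go's open word on the masked string
theorem pv_go_prefix (cs : List Char) :
    ∀ cur, PySem.Chars.split₀.go (cs.map pvMask) cur [] =
      PySem.Chars.split₀.go ((cs.dropWhile PySem.Chars.isdigit).map pvMask)
        ((cs.takeWhile PySem.Chars.isdigit).reverse ++ cur) [] := by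
  induction cs with
  | nil => intro cur; simp
  | cons c rest ih =>
      intro cur
      by_cases h : PySem.Chars.isdigit c = true
      · have hm : pvMask c = c := by unfold pvMask; simp [h]
        have hspc : PySem.Chars.isspace c = false := pv_digit_not_space c h
        have hgo : PySem.Chars.split₀.go ((c :: rest).map pvMask) cur [] =
            PySem.Chars.split₀.go (rest.map pvMask) (c :: cur) [] := by
          simp only [List.map_cons, hm, PySem.Chars.split₀.go]
          rw [if_neg (by simp [hspc])]
        rw [hgo, ih (c :: cur)]
        simp [h]
      · simp [h]

-- ===== VERDICT (by name: the statement is the Claim_ definition above) =====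
theorem InputShadow_spec : Claim_equal_InputShadow := by
  intro aline _hdom hpre
  unfold Spec_InputShadow InputShadow InputShadow_alt
  obtain ⟨hne, hdig⟩ := hpre
  cases hcs : aline.toList with
  | nil => exact absurd hcs hne
  | cons c rest =>
      rw [hcs] at hdig
      simp only [List.headD_cons] at hdig
      simp only [pvALoop1_span]
      have htw : (c :: rest).takeWhile PySem.Chars.isdigit =
          c :: rest.takeWhile PySem.Chars.isdigit := by
        simp [hdig]
      have hsplit : PySem.Chars.split₀
            ((c :: rest).map (fun c => if PySem.Chars.isdigit c then c else ' ')) =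
          PySem.Chars.split₀.go ((c :: rest).map pvMask) [] [] := rfl
      rw [hsplit, pv_go_prefix (c :: rest) []]
      cases hdw : (c :: rest).dropWhile PySem.Chars.isdigit with
      | nil =>
          -- the whole string is digits: one run, and A's second loop runs on the empty tail
          simp only [List.map_nil, PySem.Chars.split₀.go, List.append_nil]
          rw [if_neg (by simp [htw])]
          have h2 := pvALoop2_go [] [] []
          simp only [List.isEmpty_nil, List.map_nil, List.reverse_nil] at h2
          simp [htw, h2, PySem.Chars.split₀.go, pvAInt, pvBInt]
      | cons d tail =>
          -- the first loop stopped on d (a non-digit), which A's 'i += 1' skips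
          have hd : PySem.Chars.isdigit d = false := by
            have hh := List.head_dropWhile_not (p := PySem.Chars.isdigit) (l := c :: rest)
              (by rw [hdw]; simp)
            simp only [hdw, List.head_cons] at hh
            exact hh
          have hm : pvMask d = ' ' := by unfold pvMask; simp [hd]
          have hsp : PySem.Chars.isspace ' ' = true := by decide
          simp only [List.map_cons, hm, PySem.Chars.split₀.go, hsp, if_true, List.append_nil]
          rw [if_neg (by simp [htw])]
          rw [pv_go_acc (tail.map pvMask) []
            [((c :: rest).takeWhile PySem.Chars.isdigit).reverse.reverse]]
          have h2 := pvALoop2_go tail [] []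
          simp only [List.isEmpty_nil, List.reverse_nil] at h2
          simp [htw, h2, pvAInt, pvBInt]
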